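-- pv_equiv track=rewrite | github.com/MladenAngelov-dev/python_fundamentals | final_exam_trainig/activation_keys.py | flip_lower
-- ===== SOURCE A (Python) =====
-- def flip_lower(raw, start, end):
--     new_string = ""
--     for index in range(len(raw)):
--         if start <= index < end:
--             new_string += raw[index].lower()
--         else:
--             new_string += raw[index]
--     return new_string
-- ===== SOURCE B (Python) =====
-- def flip_lower(raw, start, end):
--     n = len(raw)
--     s = max(0, start)
--     e = max(0, min(n, end))
--     if s >= e:
--         return raw
--     return raw[:s] + raw[s:e].lower() + raw[e:]
-- ===== Notes on version B (the rewrite author's own statement) =====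
-- stated objective: idiomatic
-- what changed: Replaced the per-character loop with its in-range guard by clamping the bounds once and lowercasing just the middle slice (raw[:s] + raw[s:e].lower() + raw[e:]).
import Mathlib
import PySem

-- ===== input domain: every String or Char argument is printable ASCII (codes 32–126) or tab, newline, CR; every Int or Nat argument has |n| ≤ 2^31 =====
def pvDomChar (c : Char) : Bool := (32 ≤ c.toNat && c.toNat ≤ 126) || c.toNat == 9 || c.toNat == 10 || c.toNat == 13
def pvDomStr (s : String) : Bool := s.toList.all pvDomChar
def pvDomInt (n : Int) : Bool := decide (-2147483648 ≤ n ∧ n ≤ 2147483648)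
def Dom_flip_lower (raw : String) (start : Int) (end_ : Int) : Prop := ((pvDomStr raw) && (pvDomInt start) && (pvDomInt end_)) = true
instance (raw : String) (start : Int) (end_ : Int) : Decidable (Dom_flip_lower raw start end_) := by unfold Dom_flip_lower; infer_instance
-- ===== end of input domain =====

-- B lowercases the clamped middle slice in one step instead of A's per-index loop with an in-range guard (idiomatic; return values proved equal).

-- ===== PORT A =====
def flip_lower (raw : String) (start : Int) (end_ : Int) : String :=
  let cs := raw.toList
  String.ofList <|
    (PySem.List.pyRange 0 (PySem.List.len cs) 1).foldl
      (fun new_string index =>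
        if start ≤ index ∧ index < end_ then
          new_string ++ [PySem.Chars.lowerChar (PySem.List.pyGetD cs index ' ')]
        else
          new_string ++ [PySem.List.pyGetD cs index ' ']) []

-- ===== PORT B =====
def flip_lower_alt (raw : String) (start : Int) (end_ : Int) : String :=
  let cs := raw.toList
  let n : Int := PySem.List.len cs
  let s := max 0 start
  let e := max 0 (min n end_)
  if e ≤ s then raw
  else
    String.ofList (PySem.List.slice cs none (some s)
      ++ PySem.Chars.lower (PySem.List.slice cs (some s) (some e))
      ++ PySem.List.slice cs (some e) none)

-- ===== PRECONDITION & SPEC =====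
def Spec_flip_lower (raw : String) (start : Int) (end_ : Int) (out : String) : Prop := out = flip_lower_alt raw start end_
instance (raw : String) (start : Int) (end_ : Int) (out : String) : Decidable (Spec_flip_lower raw start end_ out) := by unfold Spec_flip_lower; infer_instance

-- ===== CLAIM (what is proved, stated in full; the proofs are below) =====
def Claim_equal_flip_lower : Prop := ∀ (raw : String) (start : Int) (end_ : Int), Dom_flip_lower raw start end_ → Spec_flip_lower raw start end_ (flip_lower raw start end_)

-- ===== LEMMAS AND PROOFS =====

-- mapping pyGetD over an in-bounds index range is the corresponding drop/take segment
theorem map_pyGetD_pyRange_segment (cs : List Char) (d : Char) (a b : Int)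
    (h0 : 0 ≤ a) (hab : a ≤ b) (hb : b ≤ (cs.length : Int)) :
    (PySem.List.pyRange a b).map (fun i => PySem.List.pyGetD cs i d)
      = (cs.drop a.toNat).take (b.toNat - a.toNat) := by
  apply List.ext_getElem
  · simp [PySem.List.length_pyRange_one]
    omega
  · intro k h1 h2
    have hk : k < (PySem.List.pyRange a b).length := by
      simpa using h1
    have hlt : (a + (k : Int)) < (cs.length : Int) := by
      have := hk
      rw [PySem.List.length_pyRange_one] at this
      omega
    simp only [List.getElem_map, PySem.List.getElem_pyRange_one]
    rw [PySem.List.pyGetD_eq_getElem cs d (by omega) hlt]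
    rw [List.getElem_take, List.getElem_drop]
    congr 1
    omega

theorem flip_lower_eq_alt (raw : String) (start : Int) (end_ : Int) :
    flip_lower raw start end_ = flip_lower_alt raw start end_ := by
  unfold flip_lower flip_lower_alt
  set cs := raw.toList with hcs
  have hfun : (fun (new_string : List Char) (index : Int) =>
      if start ≤ index ∧ index < end_ then
        new_string ++ [PySem.Chars.lowerChar (PySem.List.pyGetD cs index ' ')]
      else new_string ++ [PySem.List.pyGetD cs index ' '])
      = (fun (new_string : List Char) (index : Int) =>
        new_string ++ [if start ≤ index ∧ index < end_ then
            PySem.Chars.lowerChar (PySem.List.pyGetD cs index ' ')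
          else PySem.List.pyGetD cs index ' ']) := by
    funext acc i; split_ifs <;> rfl
  simp only [hfun, PySem.List.foldl_append_singleton_eq_map, PySem.List.len]
  set n : Int := (cs.length : Int) with hn
  set s : Int := max 0 start with hs
  set e : Int := max 0 (min n end_) with he
  have hn0 : 0 ≤ n := by positivity
  by_cases hse : e ≤ s
  · -- no index satisfies the guard: A copies the string unchanged
    simp only [if_pos hse]
    have hall : ((PySem.List.pyRange 0 n).map
        (fun index => if start ≤ index ∧ index < end_ then
            PySem.Chars.lowerChar (PySem.List.pyGetD cs index ' ')
          else PySem.List.pyGetD cs index ' '))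
        = (PySem.List.pyRange 0 n).map (fun j => PySem.List.pyGetD cs j ' ') := by
      apply List.map_congr_left
      intro i hi
      rw [PySem.List.mem_pyRange_one] at hi
      have : ¬ (start ≤ i ∧ i < end_) := by omega
      simp [this]
    rw [List.nil_append, hall, hn, ← PySem.List.len]
    rw [PySem.List.map_pyGetD_pyRange_zero]
    simp [hcs]
  · -- split the range at s and e
    rw [not_le] at hse
    simp only [if_neg (by omega : ¬ e ≤ s)]
    have hs0 : (0:Int) ≤ s := by omega
    have hen : e ≤ n := by omega
    have hsn : s ≤ n := by omega
    rw [List.nil_append,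
      PySem.List.pyRange_one_append 0 s n hs0 hsn,
      PySem.List.pyRange_one_append s e n (by omega) hen,
      List.map_append, List.map_append]
    have hpre : ((PySem.List.pyRange 0 s).map
        (fun index => if start ≤ index ∧ index < end_ then
            PySem.Chars.lowerChar (PySem.List.pyGetD cs index ' ')
          else PySem.List.pyGetD cs index ' '))
        = PySem.List.slice cs none (some s) := by
      have h1 : ((PySem.List.pyRange 0 s).map
          (fun index => if start ≤ index ∧ index < end_ then
              PySem.Chars.lowerChar (PySem.List.pyGetD cs index ' ')
            else PySem.List.pyGetD cs index ' '))
          = (PySem.List.pyRange 0 s).map (fun j => PySem.List.pyGetD cs j ' ') := by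
        apply List.map_congr_left
        intro i hi
        rw [PySem.List.mem_pyRange_one] at hi
        have : ¬ (start ≤ i ∧ i < end_) := by omega
        simp [this]
      rw [h1, map_pyGetD_pyRange_segment cs ' ' 0 s (le_refl 0) hs0 hsn]
      rw [PySem.List.slice_to cs hs0]
      simp
    have hmid : ((PySem.List.pyRange s e).map
        (fun index => if start ≤ index ∧ index < end_ then
            PySem.Chars.lowerChar (PySem.List.pyGetD cs index ' ')
          else PySem.List.pyGetD cs index ' '))
        = PySem.Chars.lower (PySem.List.slice cs (some s) (some e)) := by
      have h2 : ((PySem.List.pyRange s e).map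
          (fun index => if start ≤ index ∧ index < end_ then
              PySem.Chars.lowerChar (PySem.List.pyGetD cs index ' ')
            else PySem.List.pyGetD cs index ' '))
          = ((PySem.List.pyRange s e).map (fun j => PySem.List.pyGetD cs j ' ')).map
              PySem.Chars.lowerChar := by
        rw [List.map_map]
        apply List.map_congr_left
        intro i hi
        rw [PySem.List.mem_pyRange_one] at hi
        have : start ≤ i ∧ i < end_ := by omega
        simp [this]
      rw [h2, map_pyGetD_pyRange_segment cs ' ' s e hs0 (by omega) hen]
      rw [PySem.List.slice_toNat cs hs0 (by omega : (0:Int) ≤ e)]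
      simp [PySem.Chars.lower]
    have hsuf : ((PySem.List.pyRange e n).map
        (fun index => if start ≤ index ∧ index < end_ then
            PySem.Chars.lowerChar (PySem.List.pyGetD cs index ' ')
          else PySem.List.pyGetD cs index ' '))
        = PySem.List.slice cs (some e) none := by
      have h4 : ((PySem.List.pyRange e n).map
          (fun index => if start ≤ index ∧ index < end_ then
              PySem.Chars.lowerChar (PySem.List.pyGetD cs index ' ')
            else PySem.List.pyGetD cs index ' '))
          = (PySem.List.pyRange e n).map (fun j => PySem.List.pyGetD cs j ' ') := by
        apply List.map_congr_left
        intro i hi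
        rw [PySem.List.mem_pyRange_one] at hi
        have : ¬ (start ≤ i ∧ i < end_) := by omega
        simp [this]
      rw [h4, map_pyGetD_pyRange_segment cs ' ' e n (by omega) hen (le_refl n)]
      rw [PySem.List.slice_from cs (by omega : (0:Int) ≤ e)]
      apply List.take_of_length_le
      simp
      omega
    rw [hpre, hmid, hsuf, List.append_assoc]

-- ===== VERDICT (by name: the statement is the Claim_ definition above) =====
theorem flip_lower_spec : Claim_equal_flip_lower := by
  intro raw start end_ _
  unfold Spec_flip_lower
  exact flip_lower_eq_alt raw start end_
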